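-- pv_equiv track=rewrite | github.com/desaihrishik/Tradex-Alpha | backend/src/signal_engine.py | summarize_pattern_bias
-- ===== SOURCE A (Python) =====
-- BULLISH_PATTERNS = {
--     "hammer",
--     "bullish_engulfing",
--     "morning_star",
--     "three_white_soldiers",
--     "piercing",
--     "bullish_harami",
--     "struct_double_bottom",
--     "struct_inverse_head_shoulders",
--     "struct_bull_flag",
--     "struct_ascending_triangle",
--     "struct_falling_wedge",
-- }
--
-- BEARISH_PATTERNS = {
--     "hanging_man",
--     "shooting_star",
--     "bearish_engulfing",
--     "dark_cloud_cover",
--     "bearish_harami",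
--     "evening_star",
--     "three_black_crows",
--     "struct_double_top",
--     "struct_head_shoulders",
--     "struct_bear_flag",
--     "struct_descending_triangle",
--     "struct_rising_wedge",
-- }
--
-- def summarize_pattern_bias(active_patterns: list[str]) -> str:
--     bullish = [pattern for pattern in active_patterns if pattern in BULLISH_PATTERNS]
--     bearish = [pattern for pattern in active_patterns if pattern in BEARISH_PATTERNS]
--
--     if bullish and not bearish:
--         return "bullish"
--     if bearish and not bullish:
--         return "bearish"
--     if bullish or bearish:
--         return "mixed"
--     return "neutral"
-- ===== SOURCE B (Python) =====
-- BULLISH_PATTERNS = {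
--     "hammer",
--     "bullish_engulfing",
--     "morning_star",
--     "three_white_soldiers",
--     "piercing",
--     "bullish_harami",
--     "struct_double_bottom",
--     "struct_inverse_head_shoulders",
--     "struct_bull_flag",
--     "struct_ascending_triangle",
--     "struct_falling_wedge",
-- }
--
-- BEARISH_PATTERNS = {
--     "hanging_man",
--     "shooting_star",
--     "bearish_engulfing",
--     "dark_cloud_cover",
--     "bearish_harami",
--     "evening_star",
--     "three_black_crows",
--     "struct_double_top",
--     "struct_head_shoulders",
--     "struct_bear_flag",
--     "struct_descending_triangle",
--     "struct_rising_wedge",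
-- }
--
-- def summarize_pattern_bias(active_patterns: list[str]) -> str:
--     has_bull = False
--     has_bear = False
--     for pattern in active_patterns:
--         if pattern in BULLISH_PATTERNS:
--             has_bull = True
--         if pattern in BEARISH_PATTERNS:
--             has_bear = True
--         if has_bull and has_bear:
--             break
--     if has_bull and not has_bear:
--         return "bullish"
--     if has_bear and not has_bull:
--         return "bearish"
--     if has_bull or has_bear:
--         return "mixed"
--     return "neutral"
-- ===== Notes on version B (the rewrite author's own statement) =====
-- stated objective: alternative
-- what changed: Replaces the two list-building comprehensions (two full passes) with one fused pass maintaining two boolean flags has_bull/has_bear and breaking early once both are set.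
import Mathlib
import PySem

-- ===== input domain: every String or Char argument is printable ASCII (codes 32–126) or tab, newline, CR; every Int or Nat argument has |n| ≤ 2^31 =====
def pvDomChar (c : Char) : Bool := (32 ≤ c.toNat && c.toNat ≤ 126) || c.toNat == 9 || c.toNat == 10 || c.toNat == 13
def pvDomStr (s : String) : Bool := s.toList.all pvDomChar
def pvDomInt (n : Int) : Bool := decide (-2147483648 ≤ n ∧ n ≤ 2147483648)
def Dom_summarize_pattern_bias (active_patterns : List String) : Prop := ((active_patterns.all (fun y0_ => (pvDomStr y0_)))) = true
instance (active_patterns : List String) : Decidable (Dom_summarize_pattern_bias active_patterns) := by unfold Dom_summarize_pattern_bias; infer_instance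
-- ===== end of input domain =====

-- B replaces A's two list-building comprehensions with one fused pass over the list
-- maintaining two boolean flags (with early exit once both are set); same results.

-- the module-level sets BULLISH_PATTERNS / BEARISH_PATTERNS (distinct elements)
def BULLISH_PATTERNS : PySem.Set String := PySem.Set.ofList
  ["hammer", "bullish_engulfing", "morning_star", "three_white_soldiers", "piercing",
   "bullish_harami", "struct_double_bottom", "struct_inverse_head_shoulders",
   "struct_bull_flag", "struct_ascending_triangle", "struct_falling_wedge"]

def BEARISH_PATTERNS : PySem.Set String := PySem.Set.ofList
  ["hanging_man", "shooting_star", "bearish_engulfing", "dark_cloud_cover",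
   "bearish_harami", "evening_star", "three_black_crows", "struct_double_top",
   "struct_head_shoulders", "struct_bear_flag", "struct_descending_triangle",
   "struct_rising_wedge"]

-- ===== PORT A =====
def summarize_pattern_bias (active_patterns : List String) : String :=
  let bullish := active_patterns.filter (fun pattern => BULLISH_PATTERNS.contains pattern)
  let bearish := active_patterns.filter (fun pattern => BEARISH_PATTERNS.contains pattern)
  if !bullish.isEmpty && bearish.isEmpty then "bullish"
  else if !bearish.isEmpty && bullish.isEmpty then "bearish"
  else if !bullish.isEmpty || !bearish.isEmpty then "mixed"
  else "neutral"

-- ===== PORT B =====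
-- the fused for-loop of Source B: two flags, early break once both are true
def pvBiasLoop : List String → Bool → Bool → Bool × Bool
  | [], has_bull, has_bear => (has_bull, has_bear)
  | pattern :: rest, has_bull, has_bear =>
    let has_bull := if BULLISH_PATTERNS.contains pattern then true else has_bull
    let has_bear := if BEARISH_PATTERNS.contains pattern then true else has_bear
    if has_bull && has_bear then (has_bull, has_bear)
    else pvBiasLoop rest has_bull has_bear

def summarize_pattern_bias_alt (active_patterns : List String) : String :=
  let r := pvBiasLoop active_patterns false false
  if r.1 && !r.2 then "bullish"
  else if r.2 && !r.1 then "bearish"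
  else if r.1 || r.2 then "mixed"
  else "neutral"

-- ===== PRECONDITION & SPEC =====
def Spec_summarize_pattern_bias (active_patterns : List String) (out : String) : Prop := out = summarize_pattern_bias_alt active_patterns
instance (active_patterns : List String) (out : String) : Decidable (Spec_summarize_pattern_bias active_patterns out) := by unfold Spec_summarize_pattern_bias; infer_instance

-- ===== CLAIM (what is proved, stated in full; the proofs are below) =====
def Claim_equal_summarize_pattern_bias : Prop := ∀ (active_patterns : List String), Dom_summarize_pattern_bias active_patterns → Spec_summarize_pattern_bias active_patterns (summarize_pattern_bias active_patterns)

-- ===== LEMMAS AND PROOFS =====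

-- the loop computes exactly the two "any member" booleans
theorem pvBiasLoop_eq (xs : List String) (hb hr : Bool) :
    pvBiasLoop xs hb hr =
      (hb || xs.any (fun p => BULLISH_PATTERNS.contains p),
       hr || xs.any (fun p => BEARISH_PATTERNS.contains p)) := by
  induction xs generalizing hb hr with
  | nil => simp [pvBiasLoop]
  | cons p rest ih =>
    by_cases h1 : BULLISH_PATTERNS.contains p <;>
      by_cases h2 : BEARISH_PATTERNS.contains p <;>
        cases hb <;> cases hr <;>
          (simp [pvBiasLoop, h1, h2, ih]; try tauto)

theorem filter_isEmpty_eq (xs : List String) (f : String → Bool) :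
    (xs.filter f).isEmpty = !xs.any f := by
  induction xs with
  | nil => simp
  | cons p rest ih =>
    by_cases h : f p <;> simp [List.filter_cons, h, ih]

-- ===== VERDICT (by name: the statement is the Claim_ definition above) =====
theorem summarize_pattern_bias_spec : Claim_equal_summarize_pattern_bias := by
  intro xs _
  unfold Spec_summarize_pattern_bias summarize_pattern_bias summarize_pattern_bias_alt
  simp only [pvBiasLoop_eq, filter_isEmpty_eq, Bool.false_or]
  cases xs.any (fun p => BULLISH_PATTERNS.contains p) <;>
    cases xs.any (fun p => BEARISH_PATTERNS.contains p) <;> simp
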